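-- pv_equiv track=rewrite | github.com/Chonyyy/proyecto_simulacion | simulation/epidemic/virus_progression.py | add_symptom
-- ===== SOURCE A (Python) =====
-- database = {
--     "infection_stages": ["asymptomatic", "symptomatic", "critical", "terminal"],
--     "base_transmition_rate": 1.0,
--     "mask_effectiveness": 0.4,
--     "vaccination_effects": {
--         "gets_better": 2,
--         "gets_worse": 0.5,
--         "nothing_happens": 1.0
--     },
--     "symptom_notoriety": {
--         "normal_short_breath": 0.15,
--         "normal_cough": 0.15,
--         "normal_fever": 0.2,
--         "back_ache": 0.1,
--         "stomach_ache": 0.1,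
--         "lazyness": 0.05,
--         "sleepiness": 0.1,
--         "critical_short_breath": 0.2,
--         "critical_cough": 0.2,
--         "critical_fever": 0.25,
--         "gastritis": 0.15,
--         "candela": 0.2,
--         "que_ostine": 0.15,
--         "terminal_fever": 0.25
--     },
--     "possible_symptoms": {
--         "symptomatic": ["normal_fever", "normal_cough", "normal_short_breath", "back_ache", "stomach_ache", "lazyness", "sleepiness"],
--         "critical": ["critical_fever", "critical_cough", "critical_short_breath", "gastritis"],
--         "terminal": ["terminal_fever", "candela", "que_ostine"],
--         "recovered": []
--     },
--     "age_influence": {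
--         "young": {"gets_better": 0.0005, "gets_worse": 0.0003, "nothing_happens": 0.9992},
--         "adult": {"gets_better": 0.0005, "gets_worse": 0.0005, "nothing_happens": 0.9990},
--         "old": {"gets_better": 0.0005, "gets_worse": 0.0015, "nothing_happens": 0.9980}
--     },
--     "symptom_progression": {
--         "normal_fever": "critical_fever",
--         "normal_cough": "critical_cough",
--         "normal_short_breath": "critical_short_breath",
--         "stomach_ache": "gastritis",
--         "critical_fever": "terminal_fever"
--     }
-- }
--
-- def add_symptom(symptom, symptoms, next_symptoms):
--     if symptom in database["symptom_progression"].values():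
--         for key, value in database["symptom_progression"].items():
--             if value == symptom:
--                 next_symptoms.remove(key)
--                 next_symptoms.append(symptom)
--                 return next_symptoms
--     else:
--         next_symptoms.append(symptom)
--         return next_symptoms
-- ===== SOURCE B (Python) =====
-- database = {
--     "symptom_progression": {
--         "normal_fever": "critical_fever",
--         "normal_cough": "critical_cough",
--         "normal_short_breath": "critical_short_breath",
--         "stomach_ache": "gastritis",
--         "critical_fever": "terminal_fever"
--     }
-- }
--
-- _PROGRESSION = database["symptom_progression"]
--
-- def add_symptom(symptom, symptoms, next_symptoms):
--     # Single pass over next_symptoms: rebuild it, dropping the first element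
--     # whose progression is `symptom` (its predecessor), then append `symptom`.
--     out = []
--     dropped = False
--     for s in next_symptoms:
--         if not dropped and _PROGRESSION.get(s) == symptom:
--             dropped = True
--         else:
--             out.append(s)
--     out.append(symptom)
--     next_symptoms[:] = out  # same in-place update of next_symptoms as A
--     return next_symptoms
-- ===== Notes on version B (the rewrite author's own statement) =====
-- stated objective: alternative
-- what changed: Instead of scanning the progression table for a key whose value equals the symptom and calling list.remove, B makes one rebuilding pass over next_symptoms itself, applying the forward progression map to each element and dropping the first one that progresses to the symptom, then appends the symptom.
-- outside the precondition, e.g. on add_symptom('gastritis', [], ['lazyness']): A raises ValueError, B returns ['lazyness', 'gastritis']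
import Mathlib
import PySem

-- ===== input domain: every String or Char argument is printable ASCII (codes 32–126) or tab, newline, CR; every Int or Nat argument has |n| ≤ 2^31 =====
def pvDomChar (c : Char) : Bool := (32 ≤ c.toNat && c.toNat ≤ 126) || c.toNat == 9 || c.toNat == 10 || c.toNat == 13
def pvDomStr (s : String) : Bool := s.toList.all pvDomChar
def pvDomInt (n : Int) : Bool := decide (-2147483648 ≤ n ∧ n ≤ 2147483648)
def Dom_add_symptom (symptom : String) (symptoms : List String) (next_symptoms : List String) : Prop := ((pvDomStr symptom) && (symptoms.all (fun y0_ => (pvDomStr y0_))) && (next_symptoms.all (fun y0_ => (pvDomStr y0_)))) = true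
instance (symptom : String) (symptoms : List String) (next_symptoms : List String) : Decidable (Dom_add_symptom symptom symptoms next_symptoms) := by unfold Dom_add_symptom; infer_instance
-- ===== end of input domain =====

-- B rebuilds next_symptoms in one pass, dropping the first element whose forward progression is the
-- symptom, instead of A's table scan + list.remove (objective: alternative). A mutates next_symptoms
-- in place; B performs the same update, and the equivalence proved is about the return value.

-- ===== PORT A =====
-- database["symptom_progression"] (insertion order)
def progDict : PySem.Dict String String :=
  PySem.Dict.ofList [("normal_fever", "critical_fever"), ("normal_cough", "critical_cough"),
    ("normal_short_breath", "critical_short_breath"), ("stomach_ache", "gastritis"),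
    ("critical_fever", "terminal_fever")]

-- the 'for key, value in items(): if value == symptom: …' loop; falling off the loop
-- returns Python None (unreachable: values are unique), rendered []; remove? none = ValueError, outside Pre_
def addLoopA (symptom : String) (next_symptoms : List String) : List (String × String) → List String
  | [] => []
  | (key, value) :: rest =>
    if value == symptom then
      match PySem.List.remove? next_symptoms key with
      | some l => l ++ [symptom]
      | none => []
    else addLoopA symptom next_symptoms rest

def add_symptom (symptom : String) (symptoms : List String) (next_symptoms : List String) : List String :=
  if (progDict.values).contains symptom then
    addLoopA symptom next_symptoms progDict.items
  else
    next_symptoms ++ [symptom]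

-- ===== PORT B =====
-- the 'for s in next_symptoms' loop body: state (out, dropped); '_PROGRESSION.get(s) == symptom'
def stepB (symptom : String) (acc : List String × Bool) (s : String) : List String × Bool :=
  if !acc.2 && (progDict.get? s == some symptom) then (acc.1, true)
  else (acc.1 ++ [s], acc.2)

def add_symptom_alt (symptom : String) (symptoms : List String) (next_symptoms : List String) : List String :=
  (next_symptoms.foldl (stepB symptom) ([], false)).1 ++ [symptom]

-- ===== PRECONDITION & SPEC =====
-- Pre_ excludes exactly the inputs on which Python A raises ValueError (symptom is a progressed
-- symptom but its predecessor is not in next_symptoms); Python B returns the list with the symptom appended there.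
def Pre_add_symptom (symptom : String) (symptoms : List String) (next_symptoms : List String) : Prop :=
  (symptom = "critical_fever" → "normal_fever" ∈ next_symptoms) ∧
  (symptom = "critical_cough" → "normal_cough" ∈ next_symptoms) ∧
  (symptom = "critical_short_breath" → "normal_short_breath" ∈ next_symptoms) ∧
  (symptom = "gastritis" → "stomach_ache" ∈ next_symptoms) ∧
  (symptom = "terminal_fever" → "critical_fever" ∈ next_symptoms)
instance (symptom : String) (symptoms : List String) (next_symptoms : List String) : Decidable (Pre_add_symptom symptom symptoms next_symptoms) := by unfold Pre_add_symptom; infer_instance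

def pvWitness_add_symptom : String × List String × List String := ("critical_fever", ["normal_fever"], ["normal_fever", "lazyness"])

def Spec_add_symptom (symptom : String) (symptoms : List String) (next_symptoms : List String) (out : List String) : Prop := out = add_symptom_alt symptom symptoms next_symptoms
instance (symptom : String) (symptoms : List String) (next_symptoms : List String) (out : List String) : Decidable (Spec_add_symptom symptom symptoms next_symptoms out) := by unfold Spec_add_symptom; infer_instance

-- ===== CLAIM (what is proved, stated in full; the proofs are below) =====
def Claim_equal_add_symptom : Prop := ∀ (symptom : String) (symptoms : List String) (next_symptoms : List String), Dom_add_symptom symptom symptoms next_symptoms → Pre_add_symptom symptom symptoms next_symptoms → Spec_add_symptom symptom symptoms next_symptoms (add_symptom symptom symptoms next_symptoms)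

-- ===== LEMMAS AND PROOFS =====

-- the literal dict behind progDict
theorem hdmk : progDict = PySem.Dict.mk [("normal_fever", "critical_fever"), ("normal_cough", "critical_cough"),
    ("normal_short_breath", "critical_short_breath"), ("stomach_ache", "gastritis"),
    ("critical_fever", "terminal_fever")] := by decide

theorem hp1 : ∀ s, (progDict.get? s == some "critical_fever") = (s == "normal_fever") := by
  intro s
  by_cases h : s = "normal_fever"
  · subst h; decide
  · rw [beq_eq_false_iff_ne.mpr h, hdmk]
    simp only [PySem.Dict.get?_mk_cons]
    split_ifs with a b c d e <;>
      first
        | decide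
        | exact absurd (beq_iff_eq.mp a).symm h
        | simp [PySem.Dict.get?]

theorem hp2 : ∀ s, (progDict.get? s == some "critical_cough") = (s == "normal_cough") := by
  intro s
  by_cases h : s = "normal_cough"
  · subst h; decide
  · rw [beq_eq_false_iff_ne.mpr h, hdmk]
    simp only [PySem.Dict.get?_mk_cons]
    split_ifs with a b c d e <;>
      first
        | decide
        | exact absurd (beq_iff_eq.mp b).symm h
        | simp [PySem.Dict.get?]

theorem hp3 : ∀ s, (progDict.get? s == some "critical_short_breath") = (s == "normal_short_breath") := by
  intro s
  by_cases h : s = "normal_short_breath"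
  · subst h; decide
  · rw [beq_eq_false_iff_ne.mpr h, hdmk]
    simp only [PySem.Dict.get?_mk_cons]
    split_ifs with a b c d e <;>
      first
        | decide
        | exact absurd (beq_iff_eq.mp c).symm h
        | simp [PySem.Dict.get?]

theorem hp4 : ∀ s, (progDict.get? s == some "gastritis") = (s == "stomach_ache") := by
  intro s
  by_cases h : s = "stomach_ache"
  · subst h; decide
  · rw [beq_eq_false_iff_ne.mpr h, hdmk]
    simp only [PySem.Dict.get?_mk_cons]
    split_ifs with a b c d e <;>
      first
        | decide
        | exact absurd (beq_iff_eq.mp d).symm h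
        | simp [PySem.Dict.get?]

theorem hp5 : ∀ s, (progDict.get? s == some "terminal_fever") = (s == "critical_fever") := by
  intro s
  by_cases h : s = "critical_fever"
  · subst h; decide
  · rw [beq_eq_false_iff_ne.mpr h, hdmk]
    simp only [PySem.Dict.get?_mk_cons]
    split_ifs with a b c d e <;>
      first
        | decide
        | exact absurd (beq_iff_eq.mp e).symm h
        | simp [PySem.Dict.get?]

-- when symptom is none of the five progressed values, no element's progression equals it
theorem hp_none (symptom : String) (c1 : symptom ≠ "critical_fever") (c2 : symptom ≠ "critical_cough")
    (c3 : symptom ≠ "critical_short_breath") (c4 : symptom ≠ "gastritis") (c5 : symptom ≠ "terminal_fever") :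
    ∀ s, (progDict.get? s == some symptom) = false := by
  intro s
  rw [hdmk]
  simp only [PySem.Dict.get?_mk_cons]
  split_ifs with a b c d e
  · exact beq_eq_false_iff_ne.mpr (fun h => c1 (Option.some.inj h).symm)
  · exact beq_eq_false_iff_ne.mpr (fun h => c2 (Option.some.inj h).symm)
  · exact beq_eq_false_iff_ne.mpr (fun h => c3 (Option.some.inj h).symm)
  · exact beq_eq_false_iff_ne.mpr (fun h => c4 (Option.some.inj h).symm)
  · exact beq_eq_false_iff_ne.mpr (fun h => c5 (Option.some.inj h).symm)
  · simp [PySem.Dict.get?]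

-- once dropped, the fold just copies the remaining elements
theorem foldB_dropped (symptom : String) (ns : List String) (acc : List String) :
    ns.foldl (stepB symptom) (acc, true) = (acc ++ ns, true) := by
  induction ns generalizing acc with
  | nil => simp
  | cons s rest ih => simp [stepB, ih]

-- if no element of ns progresses to symptom, the fold copies everything
theorem foldB_none (symptom : String) (ns : List String) (acc : List String)
    (h : ∀ s, (progDict.get? s == some symptom) = false) :
    ns.foldl (stepB symptom) (acc, false) = (acc ++ ns, false) := by
  induction ns generalizing acc with
  | nil => simp
  | cons s rest ih => simp [stepB, h s, ih]

-- if exactly the occurrences of pred progress to symptom, and pred ∈ ns, the fold erases the first one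
theorem foldB_pred (symptom pred : String) (ns : List String) (acc : List String)
    (hp : ∀ s, (progDict.get? s == some symptom) = (s == pred)) (hmem : pred ∈ ns) :
    ns.foldl (stepB symptom) (acc, false) = (acc ++ ns.erase pred, true) := by
  induction ns generalizing acc with
  | nil => simp at hmem
  | cons s rest ih =>
    by_cases hs : s = pred
    · subst hs
      simp [stepB, hp, foldB_dropped, List.erase_cons_head]
    · have hmem' : pred ∈ rest := by
        rcases List.mem_cons.mp hmem with h | h
        · exact absurd h.symm hs
        · exact h
      have hne : (s == pred) = false := beq_eq_false_iff_ne.mpr hs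
      rw [List.erase_cons_tail (a := pred) (b := s) (by simp [hne])]
      simp [stepB, hp, hne, ih _ hmem']

-- ===== VERDICT (by name: the statement is the Claim_ definition above) =====
theorem add_symptom_spec : Claim_equal_add_symptom := by
  intro symptom symptoms next_symptoms _ hpre
  unfold Spec_add_symptom
  obtain ⟨h1, h2, h3, h4, h5⟩ := hpre
  by_cases c1 : symptom = "critical_fever"
  · subst c1
    have hm := h1 rfl
    simp [add_symptom, add_symptom_alt, addLoopA, hdmk, PySem.Dict.values,
      PySem.List.remove?_eq_some_erase next_symptoms _ hm, foldB_pred _ "normal_fever" _ _ hp1 hm]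
  by_cases c2 : symptom = "critical_cough"
  · subst c2
    have hm := h2 rfl
    simp [add_symptom, add_symptom_alt, addLoopA, hdmk, PySem.Dict.values,
      PySem.List.remove?_eq_some_erase next_symptoms _ hm, foldB_pred _ "normal_cough" _ _ hp2 hm]
  by_cases c3 : symptom = "critical_short_breath"
  · subst c3
    have hm := h3 rfl
    simp [add_symptom, add_symptom_alt, addLoopA, hdmk, PySem.Dict.values,
      PySem.List.remove?_eq_some_erase next_symptoms _ hm, foldB_pred _ "normal_short_breath" _ _ hp3 hm]
  by_cases c4 : symptom = "gastritis"
  · subst c4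
    have hm := h4 rfl
    simp [add_symptom, add_symptom_alt, addLoopA, hdmk, PySem.Dict.values,
      PySem.List.remove?_eq_some_erase next_symptoms _ hm, foldB_pred _ "stomach_ache" _ _ hp4 hm]
  by_cases c5 : symptom = "terminal_fever"
  · subst c5
    have hm := h5 rfl
    simp [add_symptom, add_symptom_alt, addLoopA, hdmk, PySem.Dict.values,
      PySem.List.remove?_eq_some_erase next_symptoms _ hm, foldB_pred _ "critical_fever" _ _ hp5 hm]
  · simp [add_symptom, add_symptom_alt, hdmk, PySem.Dict.values, c1, c2, c3, c4, c5,
      foldB_none _ _ _ (hp_none symptom c1 c2 c3 c4 c5)]
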